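-- pv_equiv track=rewrite | github.com/MrBrantCode/unitest_baseline | mut_generate/mist_train_taco/taco_18970/solution.py | restore_email_list
-- ===== SOURCE A (Python) =====
-- def restore_email_list(email_string: str) -> str:
--     # Split the input string by '@' to get components
--     comps = email_string.split('@')
--
--     # Check if the input string contains '@'
--     if '@' not in email_string:
--         return 'No solution'
--
--     # Validate the components
--     for i in range(len(comps)):
--         if i == 0 or i == len(comps) - 1:
--             if len(comps[i]) < 1:
--                 return 'No solution'
--         elif len(comps[i]) < 2:
--             return 'No solution'
--
--     # If there are only two components, join them directly
--     if len(comps) == 2: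
--         return '@'.join(comps)
--
--     # Reconstruct the email addresses
--     ans = []
--     for i in range(len(comps) - 1):
--         if i == 0:
--             ans.append(comps[i] + '@' + comps[i + 1][:1])
--         elif i == len(comps) - 2:
--             ans.append(comps[i][1:] + '@' + comps[i + 1])
--         else:
--             ans.append(comps[i][1:] + '@' + comps[i + 1][:1])
--
--     # Join the reconstructed email addresses with commas
--     return ','.join(ans)
-- ===== SOURCE B (Python) =====
-- def restore_email_list(email_string: str) -> str:
--     # Work on '@' positions in the original string instead of splitting it:
--     # each email ends one character after a non-final '@'; cut the string there.
--     pos = [i for i, ch in enumerate(email_string) if ch == '@']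
--     if not pos:
--         return 'No solution'
--     n = len(email_string)
--     if pos[0] == 0 or pos[-1] == n - 1 or any(q - p < 3 for p, q in zip(pos, pos[1:])):
--         return 'No solution'
--     cuts = [0] + [p + 2 for p in pos[:-1]] + [n]
--     return ','.join(email_string[cuts[j]:cuts[j + 1]] for j in range(len(pos)))
-- ===== Notes on version B (the rewrite author's own statement) =====
-- stated objective: alternative
-- what changed: B never splits the string: it computes the list of '@' positions, validates spacing between them (gap >= 3, not at either end), derives cut points (one character past each non-final '@') and slices the original string there, instead of A's split-on-'@' plus per-index first/middle/last re-gluing loop.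
import Mathlib
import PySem

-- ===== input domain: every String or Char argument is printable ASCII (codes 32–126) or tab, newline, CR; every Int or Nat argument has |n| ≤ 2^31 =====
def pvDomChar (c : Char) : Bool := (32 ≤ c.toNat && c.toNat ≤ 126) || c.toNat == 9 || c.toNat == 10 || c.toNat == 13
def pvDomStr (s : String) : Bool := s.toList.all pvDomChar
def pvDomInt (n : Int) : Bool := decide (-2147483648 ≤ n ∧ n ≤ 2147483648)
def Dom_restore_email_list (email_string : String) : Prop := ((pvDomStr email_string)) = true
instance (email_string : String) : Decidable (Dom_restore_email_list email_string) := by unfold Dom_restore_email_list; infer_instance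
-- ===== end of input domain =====

-- B never splits the string: it computes the '@' positions, validates the spacing between them,
-- derives cut points and slices the original string there, instead of A's split-on-'@' plus
-- per-index first/middle/last re-gluing loop; an alternative algorithm of the same O(n) cost.
-- ===== PORT A =====
def restore_email_list (email_string : String) : String :=
  let cs := email_string.toList
  let comps := PySem.Chars.splitOn cs ['@']
  if PySem.Chars.isIn ['@'] cs = false then "No solution"
  else if ((PySem.List.pyRange 0 (comps.length : Int) 1).all (fun i =>
        if i = 0 ∨ i = (comps.length : Int) - 1 then
          decide (1 ≤ (PySem.List.pyGetD comps i []).length)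
        else decide (2 ≤ (PySem.List.pyGetD comps i []).length)) = false) then "No solution"
  else if comps.length = 2 then String.ofList (PySem.Chars.join ['@'] comps)
  else
    let ans := (PySem.List.pyRange 0 ((comps.length : Int) - 1) 1).foldl (fun acc i =>
      if i = 0 then
        acc ++ [PySem.List.pyGetD comps i [] ++ ['@'] ++ PySem.List.slice (PySem.List.pyGetD comps (i+1) []) none (some 1)]
      else if i = (comps.length : Int) - 2 then
        acc ++ [PySem.List.slice (PySem.List.pyGetD comps i []) (some 1) none ++ ['@'] ++ PySem.List.pyGetD comps (i+1) []]
      else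
        acc ++ [PySem.List.slice (PySem.List.pyGetD comps i []) (some 1) none ++ ['@'] ++ PySem.List.slice (PySem.List.pyGetD comps (i+1) []) none (some 1)]) []
    String.ofList (PySem.Chars.join [','] ans)

-- ===== PORT B =====
-- B-side helper: the '@'-position comprehension [i for i, ch in enumerate(...) if ch == '@'],
-- generalized by the enumeration start offset s (B uses s = 0).
def posF (cs : List Char) (s : Int) : List Int :=
  ((PySem.List.enumerate cs s).filter (fun p => p.2 == '@')).map (fun p => p.1)

-- B: '@' positions of the original string, spacing validation, then cut-point slicing.
def restore_email_list_alt (email_string : String) : String :=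
  let cs := email_string.toList
  let pos := posF cs 0
  if pos = [] then "No solution"
  else
    let n : Int := (cs.length : Int)
    if (PySem.List.pyGetD pos 0 0 == 0 || PySem.List.pyGetD pos (-1) 0 == n - 1 ||
        (pos.zip (PySem.List.slice pos (some 1) none)).any (fun pq => decide (pq.2 - pq.1 < 3)))
    then "No solution"
    else
      let cuts := 0 :: ((PySem.List.slice pos none (some (-1))).map (fun p => p + 2) ++ [n])
      String.ofList (PySem.Chars.join [','] ((PySem.List.pyRange 0 (pos.length : Int) 1).map
        (fun j => PySem.List.slice cs (some (PySem.List.pyGetD cuts j 0)) (some (PySem.List.pyGetD cuts (j+1) 0)))))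

-- ===== PRECONDITION & SPEC =====
def Spec_restore_email_list (email_string : String) (out : String) : Prop := out = restore_email_list_alt email_string
instance (email_string : String) (out : String) : Decidable (Spec_restore_email_list email_string out) := by unfold Spec_restore_email_list; infer_instance

-- ===== CLAIM (what is proved, stated in full; the proofs are below) =====
def Claim_equal_restore_email_list : Prop := ∀ (email_string : String), Dom_restore_email_list email_string → Spec_restore_email_list email_string (restore_email_list email_string)

-- ===== LEMMAS AND PROOFS =====

-- structural specification of splitting a char list on '@'
def sp : List Char → List (List Char)
  | [] => [[]]
  | c :: t =>
    if c = '@' then [] :: sp t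
    else match sp t with
      | [] => [[c]]
      | h :: r => (c :: h) :: r

theorem sp_ne_nil (cs : List Char) : sp cs ≠ [] := by
  cases cs with
  | nil => simp [sp]
  | cons c t =>
    simp only [sp]
    split_ifs
    · simp
    · cases h : sp t <;> simp

theorem go_eq_sp (fuel : Nat) (l cur : List Char) (acc : List (List Char)) (hf : l.length < fuel) :
    PySem.Chars.splitOn.go ['@'] fuel l cur acc
      = acc.reverse ++ (sp l).modifyHead (fun h => cur.reverse ++ h) := by
  induction fuel generalizing l cur acc with
  | zero => omega
  | succ n ih =>
    cases l with
    | nil => rw [PySem.Chars.splitOn.go]; simp [sp]; omega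
    | cons c rest =>
      rw [PySem.Chars.splitOn.go]
      split_ifs with h
      · have hc : c = '@' := by
          simp [List.isPrefixOf] at h
          exact h.symm
        subst hc
        rw [show List.drop ['@'].length ('@' :: rest) = rest from rfl]
        rw [ih rest [] _ (by simp at hf ⊢; omega)]
        cases hsp : sp rest with
        | nil => exact absurd hsp (sp_ne_nil rest)
        | cons hh r => simp [sp, hsp, List.modifyHead]
      · have hc : c ≠ '@' := by
          intro hcc; subst hcc; simp [List.isPrefixOf] at h
        rw [ih rest (c :: cur) acc (by simp at hf ⊢; omega)]
        simp only [sp, if_neg hc]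
        cases hsp : sp rest with
        | nil => exact absurd hsp (sp_ne_nil rest)
        | cons hh r => simp [List.modifyHead]

theorem splitOn_eq_sp (cs : List Char) : PySem.Chars.splitOn cs ['@'] = sp cs := by
  unfold PySem.Chars.splitOn
  rw [go_eq_sp _ _ _ _ (by omega)]
  cases hsp : sp cs with
  | nil => exact absurd hsp (sp_ne_nil cs)
  | cons h r => simp [List.modifyHead]

theorem sp_join (cs : List Char) : PySem.Chars.join ['@'] (sp cs) = cs := by
  induction cs with
  | nil => simp [sp, PySem.Chars.join_singleton]
  | cons c t ih =>
    simp only [sp]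
    split_ifs with hc
    · subst hc
      cases hsp : sp t with
      | nil => exact absurd hsp (sp_ne_nil t)
      | cons h r =>
        rw [hsp] at ih
        rw [PySem.Chars.join_cons_cons]
        simp [ih]
    · cases hsp : sp t with
      | nil => exact absurd hsp (sp_ne_nil t)
      | cons h r =>
        rw [hsp] at ih
        cases r with
        | nil =>
          rw [PySem.Chars.join_singleton] at ih ⊢
          simp [ih]
        | cons y r' =>
          rw [PySem.Chars.join_cons_cons] at ih ⊢
          simp only [List.cons_append, List.append_assoc] at ih ⊢
          rw [ih]

theorem sp_free (cs : List Char) : ∀ x ∈ sp cs, '@' ∉ x := by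
  induction cs with
  | nil => simp [sp]
  | cons c t ih =>
    simp only [sp]
    split_ifs with hc
    · intro x hx
      rcases List.mem_cons.1 hx with h | h
      · subst h; simp
      · exact ih x h
    · cases hsp : sp t with
      | nil => exact absurd hsp (sp_ne_nil t)
      | cons h r =>
        rw [hsp] at ih
        intro x hx
        rcases List.mem_cons.1 hx with hh | hh
        · subst hh
          intro hmem
          rcases List.mem_cons.1 hmem with h1 | h1
          · exact hc h1.symm
          · exact ih h (by simp) h1
        · exact ih x (by simp [hh])

theorem sp_len_two (cs : List Char) (hm : '@' ∈ cs) : 2 ≤ (sp cs).length := by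
  induction cs with
  | nil => simp at hm
  | cons c t ih =>
    simp only [sp]
    split_ifs with hc
    · have h1 : 1 ≤ (sp t).length := by
        cases h : sp t with
        | nil => exact absurd h (sp_ne_nil t)
        | cons a b => simp
      simp; omega
    · have hmt : '@' ∈ t := by
        rcases List.mem_cons.1 hm with h | h
        · exact absurd h.symm hc
        · exact h
      cases hsp : sp t with
      | nil => exact absurd hsp (sp_ne_nil t)
      | cons h r =>
        have := ih hmt
        rw [hsp] at this
        simpa using this

theorem posF_nil (s : Int) : posF [] s = [] := by simp [posF, PySem.List.enumerate_nil]

theorem posF_cons (c : Char) (t : List Char) (s : Int) :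
    posF (c :: t) s = if c = '@' then s :: posF t (s + 1) else posF t (s + 1) := by
  simp only [posF, PySem.List.enumerate_cons, List.filter_cons]
  by_cases hc : c = '@' <;> simp [hc]

theorem posF_append (xs ys : List Char) (s : Int) :
    posF (xs ++ ys) s = posF xs s ++ posF ys (s + xs.length) := by
  simp [posF, PySem.List.enumerate_append, List.filter_append]

theorem posF_of_free (xs : List Char) (hf : '@' ∉ xs) (s : Int) : posF xs s = [] := by
  induction xs generalizing s with
  | nil => exact posF_nil s
  | cons c t ih =>
    rw [posF_cons, if_neg (fun h => hf (by simp [h]))]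
    exact ih (fun h => hf (by simp [h])) _

-- prefix offsets: ofs L j = length of the first j components plus their j separators
def ofs (L : List (List Char)) (j : Nat) : Nat := ((L.take j).map (fun x => x.length + 1)).sum

theorem ofs_zero (L : List (List Char)) : ofs L 0 = 0 := by simp [ofs]

theorem ofs_cons_succ (x : List Char) (r : List (List Char)) (j : Nat) :
    ofs (x :: r) (j + 1) = x.length + 1 + ofs r j := by
  simp [ofs, List.take_succ_cons]

theorem ofs_succ (L : List (List Char)) (j : Nat) (hj : j < L.length) :
    ofs L (j + 1) = ofs L j + (L[j].length + 1) := by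
  have h : L.take (j + 1) = L.take j ++ [L[j]] := by
    rw [List.take_add_one, List.getElem?_eq_getElem hj]
    rfl
  unfold ofs
  rw [h, List.map_append, List.sum_append]
  simp

theorem join_len (L : List (List Char)) (hL : L ≠ []) :
    (PySem.Chars.join ['@'] L).length + 1 = ofs L L.length := by
  induction L with
  | nil => exact absurd rfl hL
  | cons x r ih =>
    cases r with
    | nil => simp [PySem.Chars.join_singleton, ofs]
    | cons y r' =>
      rw [PySem.Chars.join_cons_cons, List.length_cons, ofs_cons_succ]
      have := ih (by simp)
      simp only [List.length_cons] at this
      simp only [List.append_assoc, List.length_append, List.length_cons, List.length_nil]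
      omega

theorem posF_join (L : List (List Char)) (hL : L ≠ []) (hf : ∀ x ∈ L, '@' ∉ x) (s : Int) :
    posF (PySem.Chars.join ['@'] L) s
      = (List.range (L.length - 1)).map (fun j => s + (ofs L (j + 1) : Int) - 1) := by
  induction L generalizing s with
  | nil => exact absurd rfl hL
  | cons x r ih =>
    cases r with
    | nil =>
      rw [PySem.Chars.join_singleton]
      simp [posF_of_free x (hf x (by simp)) s]
    | cons y r' =>
      rw [PySem.Chars.join_cons_cons]
      rw [show x ++ ['@'] ++ PySem.Chars.join ['@'] (y :: r') = x ++ ('@' :: PySem.Chars.join ['@'] (y :: r')) by simp]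
      rw [posF_append, posF_of_free x (hf x (by simp)) s, posF_cons, if_pos rfl]
      rw [ih (by simp) (fun z hz => hf z (by simp [hz])) (s + x.length + 1)]
      simp only [List.length_cons, Nat.add_sub_cancel, List.nil_append]
      rw [List.range_succ_eq_map]
      simp only [List.map_cons, List.map_map]
      refine List.cons_eq_cons.mpr ⟨?_, ?_⟩
      · rw [ofs_cons_succ, ofs_zero]
        push_cast; ring
      · apply List.map_congr_left
        intro j hj
        simp only [Function.comp, Nat.succ_eq_add_one]
        rw [ofs_cons_succ x (y :: r') (j + 1), ofs_cons_succ y r' j]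
        push_cast; ring

theorem drop_join (j : Nat) (L : List (List Char)) (hj : j < L.length) :
    (PySem.Chars.join ['@'] L).drop (ofs L j) = PySem.Chars.join ['@'] (L.drop j) := by
  induction j generalizing L with
  | zero => simp [ofs_zero]
  | succ i ih =>
    cases L with
    | nil => simp at hj
    | cons x r =>
      cases r with
      | nil => simp at hj
      | cons y r' =>
        rw [PySem.Chars.join_cons_cons, ofs_cons_succ, List.drop_succ_cons]
        rw [show x.length + 1 + ofs (y :: r') i = (x ++ ['@']).length + ofs (y :: r') i by simp]
        rw [List.drop_append, List.drop_of_length_le (Nat.le_add_right _ _), List.nil_append,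
            Nat.add_sub_cancel_left]
        exact ih (y :: r') (by simpa using hj)

theorem take1_join (m : List Char) (r : List (List Char)) (hm : m ≠ []) :
    (PySem.Chars.join ['@'] (m :: r)).take 1 = m.take 1 := by
  cases r with
  | nil => rw [PySem.Chars.join_singleton]
  | cons y r' =>
    rw [PySem.Chars.join_cons_cons]
    cases m with
    | nil => exact absurd rfl hm
    | cons a m' => simp

theorem slice_none_negone {α : Type} (xs : List α) :
    PySem.List.slice xs none (some (-1)) = xs.dropLast := by
  simp only [PySem.List.slice, PySem.List.clampIdx]
  split_ifs with h1 h2 <;> try omega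
  · have hx : xs = [] := List.length_eq_zero_iff.1 (by omega)
    subst hx; simp
  · rw [List.dropLast_eq_take]
    congr 1
    omega

-- getD on a sandwich list (used on both sides)
theorem getD_mid (c0 cl : List Char) (ms : List (List Char)) (j : Nat) (hj : j < ms.length) :
    (c0 :: ms ++ [cl]).getD (j+1) [] = ms[j] := by
  simp [List.getD, List.getElem?_append, hj]

theorem getD_last (c0 cl : List Char) (ms : List (List Char)) :
    (c0 :: ms ++ [cl]).getD (ms.length+1) [] = cl := by
  simp [List.getD]

theorem validA_iff (c0 cl : List Char) (ms : List (List Char)) :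
    ((PySem.List.pyRange 0 ((ms.length + 1 + 1 : Nat) : Int) 1).all (fun i =>
        if i = 0 ∨ i = ((ms.length + 1 + 1 : Nat) : Int) - 1 then
          decide (1 ≤ (PySem.List.pyGetD (c0 :: ms ++ [cl]) i []).length)
        else decide (2 ≤ (PySem.List.pyGetD (c0 :: ms ++ [cl]) i []).length)) = true)
    ↔ (1 ≤ c0.length ∧ 1 ≤ cl.length ∧ ∀ c ∈ ms, 2 ≤ c.length) := by
  rw [PySem.List.pyRange_zero_natCast]
  simp only [List.all_map, List.all_eq_true, List.mem_range, Function.comp, PySem.List.pyGetD_natCast]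
  constructor
  · intro h
    refine ⟨?_, ?_, ?_⟩
    · have := h 0 (by omega)
      rw [if_pos (by left; rfl)] at this
      simpa using this
    · have := h (ms.length + 1) (by omega)
      rw [if_pos (by right; push_cast; ring)] at this
      rw [getD_last] at this
      simpa using this
    · intro c hcmem
      obtain ⟨j, hj, rfl⟩ := List.mem_iff_getElem.1 hcmem
      have := h (j + 1) (by omega)
      rw [if_neg (by push_cast; omega)] at this
      rw [getD_mid c0 cl ms j hj] at this
      simpa using this
  · rintro ⟨h1, h2, h3⟩ k hk
    by_cases hk0 : k = 0
    · subst hk0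
      rw [if_pos (by left; rfl)]
      simpa using h1
    · by_cases hkl : k = ms.length + 1
      · subst hkl
        rw [if_pos (by right; push_cast; ring)]
        rw [getD_last]
        simpa using h2
      · rw [if_neg (by push_cast; omega)]
        obtain ⟨j, rfl⟩ : ∃ j, k = j + 1 := ⟨k - 1, by omega⟩
        have hj : j < ms.length := by omega
        rw [getD_mid c0 cl ms j hj]
        simpa using h3 ms[j] (List.getElem_mem hj)

theorem build_eq (c0 cl : List Char) (ms : List (List Char)) (hms : ms ≠ []) :
    ((PySem.List.pyRange 0 (((ms.length + 1 + 1 : Nat) : Int) - 1) 1).foldl (fun acc i =>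
      if i = 0 then
        acc ++ [PySem.List.pyGetD (c0 :: ms ++ [cl]) i [] ++ ['@'] ++ PySem.List.slice (PySem.List.pyGetD (c0 :: ms ++ [cl]) (i+1) []) none (some 1)]
      else if i = ((ms.length + 1 + 1 : Nat) : Int) - 2 then
        acc ++ [PySem.List.slice (PySem.List.pyGetD (c0 :: ms ++ [cl]) i []) (some 1) none ++ ['@'] ++ PySem.List.pyGetD (c0 :: ms ++ [cl]) (i+1) []]
      else
        acc ++ [PySem.List.slice (PySem.List.pyGetD (c0 :: ms ++ [cl]) i []) (some 1) none ++ ['@'] ++ PySem.List.slice (PySem.List.pyGetD (c0 :: ms ++ [cl]) (i+1) []) none (some 1)]) [])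
    = ((c0 :: ms.map (fun c => PySem.List.slice c (some 1) none)).zip
        (ms.map (fun c => PySem.List.slice c none (some 1)) ++ [cl])).map (fun p => p.1 ++ '@' :: p.2) := by
  rw [show (((ms.length + 1 + 1 : Nat) : Int) - 1) = ((ms.length + 1 : Nat) : Int) by push_cast; ring]
  rw [PySem.List.pyRange_zero_natCast, List.foldl_map]
  rw [show (fun (acc : List (List Char)) (k : Nat) =>
      if (k : Int) = 0 then
        acc ++ [PySem.List.pyGetD (c0 :: ms ++ [cl]) (k : Int) [] ++ ['@'] ++ PySem.List.slice (PySem.List.pyGetD (c0 :: ms ++ [cl]) ((k : Int)+1) []) none (some 1)]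
      else if (k : Int) = ((ms.length + 1 + 1 : Nat) : Int) - 2 then
        acc ++ [PySem.List.slice (PySem.List.pyGetD (c0 :: ms ++ [cl]) (k : Int) []) (some 1) none ++ ['@'] ++ PySem.List.pyGetD (c0 :: ms ++ [cl]) ((k : Int)+1) []]
      else
        acc ++ [PySem.List.slice (PySem.List.pyGetD (c0 :: ms ++ [cl]) (k : Int) []) (some 1) none ++ ['@'] ++ PySem.List.slice (PySem.List.pyGetD (c0 :: ms ++ [cl]) ((k : Int)+1) []) none (some 1)])
    = (fun (acc : List (List Char)) (k : Nat) => acc ++ [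
      if (k : Int) = 0 then
        PySem.List.pyGetD (c0 :: ms ++ [cl]) (k : Int) [] ++ ['@'] ++ PySem.List.slice (PySem.List.pyGetD (c0 :: ms ++ [cl]) ((k : Int)+1) []) none (some 1)
      else if (k : Int) = ((ms.length + 1 + 1 : Nat) : Int) - 2 then
        PySem.List.slice (PySem.List.pyGetD (c0 :: ms ++ [cl]) (k : Int) []) (some 1) none ++ ['@'] ++ PySem.List.pyGetD (c0 :: ms ++ [cl]) ((k : Int)+1) []
      else
        PySem.List.slice (PySem.List.pyGetD (c0 :: ms ++ [cl]) (k : Int) []) (some 1) none ++ ['@'] ++ PySem.List.slice (PySem.List.pyGetD (c0 :: ms ++ [cl]) ((k : Int)+1) []) none (some 1)])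
    from by funext acc k; split_ifs <;> rfl]
  rw [PySem.List.foldl_append_singleton_eq_map]
  simp only [List.nil_append]
  apply List.ext_getElem
  · simp
  · intro k hk1 hk2
    simp only [List.length_map, List.length_range] at hk1
    simp only [List.getElem_map, List.getElem_range, List.getElem_zip]
    have hsucc : ((k : Int) + 1) = ((k + 1 : Nat) : Int) := by push_cast; ring
    by_cases hk0 : k = 0
    · subst hk0
      rw [if_pos (by norm_num)]
      rcases ms with _ | ⟨m0, ms'⟩
      · exact absurd rfl hms
      · have h1 : ((0 : Nat) : Int) + 1 = ((1 : Nat) : Int) := by norm_num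
        rw [h1, PySem.List.pyGetD_natCast, PySem.List.pyGetD_natCast,
            getD_mid c0 cl (m0 :: ms') 0 (by simp)]
        simp [PySem.List.slice_to _ (by norm_num : (0:Int) ≤ 1)]
    · rw [if_neg (by exact_mod_cast hk0)]
      obtain ⟨j, rfl⟩ : ∃ j, k = j + 1 := ⟨k - 1, by omega⟩
      rw [hsucc, PySem.List.pyGetD_natCast, PySem.List.pyGetD_natCast]
      by_cases hkl : j + 1 = ms.length
      · rw [if_pos (by push_cast; omega)]
        rw [show j + 1 + 1 = ms.length + 1 by omega, getD_last,
            getD_mid c0 cl ms j (by omega)]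
        rw [List.getElem_cons_succ, List.getElem_map,
            List.getElem_append_right (by simp; omega)]
        simp [PySem.List.slice_from_one, hkl]
      · rw [if_neg (by push_cast; omega)]
        rw [getD_mid c0 cl ms j (by omega), getD_mid c0 cl ms (j+1) (by omega)]
        rw [List.getElem_cons_succ, List.getElem_map,
            List.getElem_append_left (by simp; omega), List.getElem_map]
        simp [PySem.List.slice_from_one, PySem.List.slice_to _ (by norm_num : (0:Int) ≤ 1)]

theorem getD_mid' {α : Type} (a z d : α) (xs : List α) (j : Nat) (hj : j < xs.length) :
    (a :: (xs ++ [z])).getD (j+1) d = xs[j] := by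
  simp [List.getD, List.getElem?_append, hj]

theorem getD_last' {α : Type} (a z d : α) (xs : List α) :
    (a :: (xs ++ [z])).getD (xs.length+1) d = z := by
  simp [List.getD]

theorem getElem_sand_mid (c0 cl : List Char) (ms : List (List Char)) (j : Nat) (hj : j < ms.length) :
    (c0 :: ms ++ [cl])[j + 1]'(by simp; omega) = ms[j] := by
  simp [hj]

theorem getElem_sand_last (c0 cl : List Char) (ms : List (List Char)) :
    (c0 :: ms ++ [cl])[ms.length + 1]'(by simp) = cl := by
  simp

theorem getElem_sand_last'' (c0 cl : List Char) (ms : List (List Char)) (j : Nat)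
    (hj : j = ms.length + 1) (h : j < (c0 :: ms ++ [cl]).length) :
    (c0 :: ms ++ [cl])[j] = cl := by
  subst hj
  simp

theorem ofs_sand_mid (c0 cl : List Char) (ms : List (List Char)) (j : Nat) (hj : j < ms.length) :
    ofs (c0 :: ms ++ [cl]) (j + 1 + 1) = ofs (c0 :: ms ++ [cl]) (j + 1) + (ms[j].length + 1) := by
  rw [ofs_succ _ _ (by simp; omega), getElem_sand_mid c0 cl ms j hj]

theorem ofs_sand_last (c0 cl : List Char) (ms : List (List Char)) :
    ofs (c0 :: ms ++ [cl]) (ms.length + 2) = ofs (c0 :: ms ++ [cl]) (ms.length + 1) + (cl.length + 1) := by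
  rw [show ms.length + 2 = (ms.length + 1) + 1 from rfl, ofs_succ _ _ (by simp), getElem_sand_last c0 cl ms]

theorem zip_tail_map_range {α : Type} (f : Nat → α) (k : Nat) :
    ((List.range k).map f).zip (((List.range k).map f).tail)
      = (List.range (k - 1)).map (fun j => (f j, f (j + 1))) := by
  apply List.ext_getElem
  · simp [List.length_zip]
  · intro j h1 h2
    simp [List.getElem_zip, List.getElem_tail]

theorem isIn_at_false (cs : List Char) (h : '@' ∉ cs) : PySem.Chars.isIn ['@'] cs = false := by
  rw [Bool.eq_false_iff]
  intro hh
  exact h (((PySem.Chars.isIn_iff_infix _ _).1 hh).subset (by simp))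

theorem isIn_at_true (cs : List Char) (h : '@' ∈ cs) : PySem.Chars.isIn ['@'] cs = true := by
  obtain ⟨a, b, rfl⟩ := List.append_of_mem h
  refine (PySem.Chars.isIn_iff_infix _ _).2 ⟨a, b, by simp⟩

theorem validB_iff (c0 cl : List Char) (ms : List (List Char)) :
    ((PySem.List.pyGetD ((List.range (ms.length + 1)).map (fun j => ((ofs (c0 :: ms ++ [cl]) (j + 1) : Int)) - 1)) 0 0 == 0 ||
      PySem.List.pyGetD ((List.range (ms.length + 1)).map (fun j => ((ofs (c0 :: ms ++ [cl]) (j + 1) : Int)) - 1)) (-1) 0 == ((PySem.Chars.join ['@'] (c0 :: ms ++ [cl])).length : Int) - 1 ||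
      (((List.range (ms.length + 1)).map (fun j => ((ofs (c0 :: ms ++ [cl]) (j + 1) : Int)) - 1)).zip
        (PySem.List.slice ((List.range (ms.length + 1)).map (fun j => ((ofs (c0 :: ms ++ [cl]) (j + 1) : Int)) - 1)) (some 1) none)).any
        (fun pq => decide (pq.2 - pq.1 < 3)))) = false
    ↔ (1 ≤ c0.length ∧ 1 ≤ cl.length ∧ ∀ c ∈ ms, 2 ≤ c.length) := by
  have h0 : PySem.List.pyGetD ((List.range (ms.length + 1)).map (fun j => ((ofs (c0 :: ms ++ [cl]) (j + 1) : Int)) - 1)) 0 0 = (c0.length : Int) := by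
    rw [List.range_succ_eq_map, List.map_cons, PySem.List.pyGetD_zero_cons]
    have h : ofs (c0 :: ms ++ [cl]) (0 + 1) = c0.length + 1 := by simp [ofs]
    rw [h]
    push_cast; ring
  have h1 : PySem.List.pyGetD ((List.range (ms.length + 1)).map (fun j => ((ofs (c0 :: ms ++ [cl]) (j + 1) : Int)) - 1)) (-1) 0 = (ofs (c0 :: ms ++ [cl]) (ms.length + 1) : Int) - 1 := by
    rw [List.range_succ, List.map_append, List.map_cons, List.map_nil, PySem.List.pyGetD_neg_one_append_singleton]
  have h2 : ((PySem.Chars.join ['@'] (c0 :: ms ++ [cl])).length : Int) = (ofs (c0 :: ms ++ [cl]) (ms.length + 2) : Int) - 1 := by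
    have := join_len (c0 :: ms ++ [cl]) (by simp)
    simp only [List.length_cons, List.length_append, List.length_nil] at this
    rw [show ms.length + 1 + 1 = ms.length + 2 from rfl] at this
    omega
  have h3 := ofs_sand_last c0 cl ms
  have hzip : (((List.range (ms.length + 1)).map (fun j => ((ofs (c0 :: ms ++ [cl]) (j + 1) : Int)) - 1)).zip
        (PySem.List.slice ((List.range (ms.length + 1)).map (fun j => ((ofs (c0 :: ms ++ [cl]) (j + 1) : Int)) - 1)) (some 1) none))
      = (List.range ms.length).map (fun j => ((ofs (c0 :: ms ++ [cl]) (j + 1) : Int) - 1, (ofs (c0 :: ms ++ [cl]) (j + 1 + 1) : Int) - 1)) := by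
    rw [PySem.List.slice_from_one, zip_tail_map_range]
    simp
  rw [h0, h1, h2, hzip]
  simp only [Bool.or_eq_false_iff, beq_eq_false_iff_ne, ne_eq, List.any_map, List.any_eq_false,
    Function.comp, List.mem_range, decide_eq_true_eq]
  constructor
  · rintro ⟨⟨ha, hb⟩, hc⟩
    refine ⟨by omega, by omega, ?_⟩
    intro c hcmem
    obtain ⟨j, hj, rfl⟩ := List.mem_iff_getElem.1 hcmem
    have := hc j hj
    have hm := ofs_sand_mid c0 cl ms j hj
    omega
  · rintro ⟨ha, hb, hc⟩
    refine ⟨⟨by omega, by omega⟩, ?_⟩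
    intro j hj
    have hm := ofs_sand_mid c0 cl ms j hj
    have := hc ms[j] (List.getElem_mem hj)
    omega

theorem take_head_join (a b : List Char) (rest : List (List Char)) (hb : b ≠ []) :
    (PySem.Chars.join ['@'] (a :: b :: rest)).take (a.length + 2) = a ++ '@' :: b.take 1 := by
  rw [PySem.Chars.join_cons_cons, List.append_assoc, List.take_append,
      List.take_of_length_le (by omega)]
  congr 1
  rw [show a.length + 2 - a.length = 2 by omega, List.singleton_append,
      List.take_succ_cons, take1_join b rest hb]

theorem email_mid (a b : List Char) (rest : List (List Char)) (ha : a ≠ []) (hb : b ≠ []) :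
    ((PySem.Chars.join ['@'] (a :: b :: rest)).drop 1).take (a.length + 1) = a.tail ++ '@' :: b.take 1 := by
  obtain ⟨ah, at', rfl⟩ := List.exists_cons_of_ne_nil ha
  rw [PySem.Chars.join_cons_cons]
  simp only [List.cons_append, List.drop_succ_cons, List.drop_zero, List.length_cons,
    List.tail_cons]
  rw [List.append_assoc, List.take_append, List.take_of_length_le (by omega)]
  congr 1
  rw [show at'.length + 1 + 1 - at'.length = 2 by omega, List.singleton_append,
      List.take_succ_cons, take1_join b rest hb]

theorem email_last (a cl : List Char) (ha : a ≠ []) :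
    (PySem.Chars.join ['@'] [a, cl]).drop 1 = a.tail ++ '@' :: cl := by
  obtain ⟨ah, at', rfl⟩ := List.exists_cons_of_ne_nil ha
  rw [PySem.Chars.join_cons_cons, PySem.Chars.join_singleton]
  simp

theorem slices_eq (c0 cl : List Char) (ms : List (List Char)) (hms : ms ≠ [])
    (hne : ∀ m ∈ ms, m ≠ []) :
    (PySem.List.pyRange 0 ((ms.length + 1 : Nat) : Int) 1).map
      (fun j => PySem.List.slice (PySem.Chars.join ['@'] (c0 :: ms ++ [cl]))
        (some (PySem.List.pyGetD ((0:Int) :: ((List.range ms.length).map (fun i => ((ofs (c0 :: ms ++ [cl]) (i + 1) : Int)) + 1) ++ [((PySem.Chars.join ['@'] (c0 :: ms ++ [cl])).length : Int)])) j 0))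
        (some (PySem.List.pyGetD ((0:Int) :: ((List.range ms.length).map (fun i => ((ofs (c0 :: ms ++ [cl]) (i + 1) : Int)) + 1) ++ [((PySem.Chars.join ['@'] (c0 :: ms ++ [cl])).length : Int)])) (j + 1) 0)))
    = ((c0 :: ms.map (fun c => PySem.List.slice c (some 1) none)).zip
        (ms.map (fun c => PySem.List.slice c none (some 1)) ++ [cl])).map (fun p => p.1 ++ '@' :: p.2) := by
  have hcs : (PySem.Chars.join ['@'] (c0 :: ms ++ [cl])).length + 1
      = ofs (c0 :: ms ++ [cl]) (ms.length + 2) := by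
    have h := join_len (c0 :: ms ++ [cl]) (by simp)
    rw [show (c0 :: ms ++ [cl]).length = ms.length + 2 by simp] at h
    exact h
  have hcut0 : (0 :: ((List.range ms.length).map (fun i => ((ofs (c0 :: ms ++ [cl]) (i + 1) : Int)) + 1) ++ [((PySem.Chars.join ['@'] (c0 :: ms ++ [cl])).length : Int)])).getD 0 0 = ((0 : Nat) : Int) := by
    simp
  have hcutmid : ∀ i, i < ms.length →
      (0 :: ((List.range ms.length).map (fun i => ((ofs (c0 :: ms ++ [cl]) (i + 1) : Int)) + 1) ++ [((PySem.Chars.join ['@'] (c0 :: ms ++ [cl])).length : Int)])).getD (i + 1) 0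
        = ((ofs (c0 :: ms ++ [cl]) (i + 1) + 1 : Nat) : Int) := by
    intro i hi
    rw [getD_mid' (0 : Int) ((PySem.Chars.join ['@'] (c0 :: ms ++ [cl])).length : Int) 0
      ((List.range ms.length).map (fun i => ((ofs (c0 :: ms ++ [cl]) (i + 1) : Int)) + 1)) i
      (by simp [hi])]
    rw [List.getElem_map, List.getElem_range]
    push_cast; ring
  have hcutlast : ∀ j, j = ms.length + 1 →
      (0 :: ((List.range ms.length).map (fun i => ((ofs (c0 :: ms ++ [cl]) (i + 1) : Int)) + 1) ++ [((PySem.Chars.join ['@'] (c0 :: ms ++ [cl])).length : Int)])).getD j 0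
      = ((PySem.Chars.join ['@'] (c0 :: ms ++ [cl])).length : Int) := by
    intro j hj
    subst hj
    have h := getD_last' (0 : Int) ((PySem.Chars.join ['@'] (c0 :: ms ++ [cl])).length : Int) 0
      ((List.range ms.length).map (fun i => ((ofs (c0 :: ms ++ [cl]) (i + 1) : Int)) + 1))
    rw [List.length_map, List.length_range] at h
    exact h
  rw [PySem.List.pyRange_zero_natCast]
  apply List.ext_getElem
  · simp
  · intro j hj1 hj2
    simp only [List.length_map, List.length_range] at hj1
    simp only [List.getElem_map, List.getElem_range, List.getElem_zip]
    rw [show ((j : Int) + 1) = ((j + 1 : Nat) : Int) by push_cast; ring]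
    rw [PySem.List.pyGetD_natCast, PySem.List.pyGetD_natCast]
    by_cases hj0 : j = 0
    · subst hj0
      obtain ⟨m0, ms', rfl⟩ := List.exists_cons_of_ne_nil hms
      rw [hcut0, show (0 : Nat) + 1 = 0 + 1 from rfl, hcutmid 0 (by simp)]
      rw [PySem.List.slice_natCast]
      simp only [Nat.sub_zero, List.drop_zero]
      have hofs1 : ofs (c0 :: (m0 :: ms') ++ [cl]) (0 + 1) = c0.length + 1 := by simp [ofs]
      rw [hofs1, show c0.length + 1 + 1 = c0.length + 2 from rfl]
      rw [show (c0 :: (m0 :: ms') ++ [cl]) = c0 :: m0 :: (ms' ++ [cl]) from rfl]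
      rw [take_head_join c0 m0 (ms' ++ [cl]) (hne m0 (by simp))]
      simp [PySem.List.slice_to _ (by norm_num : (0:Int) ≤ 1)]
    · obtain ⟨i, rfl⟩ : ∃ i, j = i + 1 := ⟨j - 1, by omega⟩
      rw [hcutmid i (by omega)]
      have hmsi : ms[i] ≠ [] := hne _ (List.getElem_mem (by omega))
      by_cases hlast : i + 1 = ms.length
      · -- last email
        rw [hcutlast (i + 1 + 1) (by omega)]
        rw [PySem.List.slice_natCast]
        rw [show ofs (c0 :: ms ++ [cl]) (i + 1) + 1 = ofs (c0 :: ms ++ [cl]) (i + 1) + 1 from rfl,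
            ← List.drop_drop]
        rw [drop_join (i + 1) _ (by simp; omega)]
        rw [List.drop_eq_getElem_cons (show i + 1 < (c0 :: ms ++ [cl]).length by simp; omega)]
        rw [List.drop_eq_getElem_cons (show i + 1 + 1 < (c0 :: ms ++ [cl]).length by simp; omega)]
        rw [List.drop_of_length_le (show (c0 :: ms ++ [cl]).length ≤ i + 1 + 1 + 1 by simp; omega)]
        rw [getElem_sand_mid c0 cl ms i (by omega)]
        rw [getElem_sand_last'' c0 cl ms (i + 1 + 1) (by omega) (by simp; omega)]
        rw [email_last ms[i] cl hmsi]
        have hmid := ofs_sand_mid c0 cl ms i (by omega)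
        rw [show i + 1 + 1 = ms.length + 1 by omega] at hmid
        have hlast' := ofs_sand_last c0 cl ms
        have hlen1 : 1 ≤ ms[i].length := by
          cases h : ms[i] with
          | nil => exact absurd h hmsi
          | cons a b => simp
        rw [List.take_of_length_le (by
          simp only [List.length_append, List.length_tail, List.length_cons]
          omega)]
        rw [List.getElem_cons_succ, List.getElem_map,
            List.getElem_append_right (by simp; omega)]
        simp [PySem.List.slice_from_one]
      · -- middle email
        rw [hcutmid (i + 1) (by omega)]
        rw [PySem.List.slice_natCast]
        have hmid := ofs_sand_mid c0 cl ms i (by omega)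
        rw [show ofs (c0 :: ms ++ [cl]) (i + 1 + 1) + 1 - (ofs (c0 :: ms ++ [cl]) (i + 1) + 1)
            = ms[i].length + 1 by omega]
        rw [← List.drop_drop]
        rw [drop_join (i + 1) _ (by simp; omega)]
        rw [List.drop_eq_getElem_cons (show i + 1 < (c0 :: ms ++ [cl]).length by simp; omega)]
        rw [List.drop_eq_getElem_cons (show i + 1 + 1 < (c0 :: ms ++ [cl]).length by simp; omega)]
        rw [getElem_sand_mid c0 cl ms i (by omega)]
        rw [getElem_sand_mid c0 cl ms (i + 1) (by omega)]
        rw [email_mid ms[i] ms[i+1] _ hmsi (hne _ (List.getElem_mem (by omega)))]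
        rw [List.getElem_cons_succ, List.getElem_map,
            List.getElem_append_left (by simp; omega), List.getElem_map]
        simp [PySem.List.slice_from_one, PySem.List.slice_to _ (by norm_num : (0:Int) ≤ 1)]

theorem main_eq (s : String) (hm : '@' ∈ s.toList) (c0 cl : List Char) (ms : List (List Char))
    (hc : sp s.toList = c0 :: ms ++ [cl]) :
    restore_email_list s = restore_email_list_alt s := by
  have hjoin : PySem.Chars.join ['@'] (c0 :: ms ++ [cl]) = s.toList := by
    rw [← hc]; exact sp_join _
  have hfree : ∀ x ∈ (c0 :: ms ++ [cl]), '@' ∉ x := by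
    rw [← hc]; exact sp_free _
  have hin : PySem.Chars.isIn ['@'] (PySem.Chars.join ['@'] (c0 :: ms ++ [cl])) = true := by
    rw [hjoin]; exact isIn_at_true s.toList hm
  have hsc : PySem.Chars.splitOn (PySem.Chars.join ['@'] (c0 :: ms ++ [cl])) ['@'] = c0 :: ms ++ [cl] := by
    rw [splitOn_eq_sp, hjoin, hc]
  have hpos : posF (PySem.Chars.join ['@'] (c0 :: ms ++ [cl])) 0
      = (List.range (ms.length + 1)).map (fun j => ((ofs (c0 :: ms ++ [cl]) (j + 1) : Int)) - 1) := by
    rw [posF_join _ (by simp) hfree 0]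
    rw [show (c0 :: ms ++ [cl]).length - 1 = ms.length + 1 by simp]
    apply List.map_congr_left
    intro j hj
    ring
  have hL : (c0 :: ms ++ [cl]).length = ms.length + 1 + 1 := by simp
  unfold restore_email_list restore_email_list_alt
  rw [← hjoin]
  simp only [hin, hsc, hpos, hL, List.length_map, List.length_range,
    Bool.true_eq_false, if_false]
  rw [if_neg (show ¬ ((List.range (ms.length + 1)).map (fun j => ((ofs (c0 :: ms ++ [cl]) (j + 1) : Int)) - 1) = []) by simp)]
  by_cases hP : 1 ≤ c0.length ∧ 1 ≤ cl.length ∧ ∀ c ∈ ms, 2 ≤ c.length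
  · have hA : _ = true := (validA_iff c0 cl ms).2 hP
    have hB : _ = false := (validB_iff c0 cl ms).2 hP
    rw [hA, hB]
    simp only [Bool.true_eq_false, Bool.false_eq_true, if_false]
    rcases ms with _ | ⟨m0, ms'⟩
    · -- single '@': one email, the whole string
      rw [if_pos (show ([] : List (List Char)).length + 1 + 1 = 2 by simp)]
      simp only [List.length_nil, Nat.zero_add]
      have h1 : PySem.List.slice ((List.range 1).map (fun j => ((ofs (c0 :: ([] : List (List Char)) ++ [cl]) (j + 1) : Int)) - 1)) none (some (-1)) = [] := by
        rw [slice_none_negone]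
        simp
      rw [h1]
      simp only [List.map_nil, List.nil_append]
      rw [PySem.List.pyRange_zero_natCast]
      simp only [List.range_one, List.map_cons, List.map_nil]
      rw [show ((0 : Nat) : Int) = (0 : Int) by simp]
      rw [PySem.List.pyGetD_zero_cons]
      rw [show (0 : Int) + 1 = ((1 : Nat) : Int) by simp]
      rw [PySem.List.pyGetD_natCast]
      rw [show ([(0 : Int), ((PySem.Chars.join ['@'] (c0 :: ([] : List (List Char)) ++ [cl])).length : Int)]).getD 1 0 = ((PySem.Chars.join ['@'] (c0 :: ([] : List (List Char)) ++ [cl])).length : Int) by simp [List.getD]]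
      rw [show (0 : Int) = ((0 : Nat) : Int) by simp]
      rw [PySem.List.slice_natCast]
      simp only [Nat.sub_zero, List.drop_zero]
      rw [List.take_of_length_le (le_refl _)]
      rw [PySem.Chars.join_singleton]
    · -- at least two emails
      rw [if_neg (show ¬ ((m0 :: ms').length + 1 + 1 = 2) by simp)]
      rw [build_eq c0 cl (m0 :: ms') (by simp)]
      have hdl : PySem.List.slice ((List.range ((m0 :: ms').length + 1)).map (fun j => ((ofs (c0 :: (m0 :: ms') ++ [cl]) (j + 1) : Int)) - 1)) none (some (-1))
          = (List.range (m0 :: ms').length).map (fun j => ((ofs (c0 :: (m0 :: ms') ++ [cl]) (j + 1) : Int)) - 1) := by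
        rw [slice_none_negone, List.range_succ, List.map_append, List.map_cons, List.map_nil,
            List.dropLast_concat]
      rw [hdl, List.map_map]
      rw [show ((fun p => p + 2) ∘ (fun j => ((ofs (c0 :: (m0 :: ms') ++ [cl]) (j + 1) : Int)) - 1))
          = (fun j => ((ofs (c0 :: (m0 :: ms') ++ [cl]) (j + 1) : Int)) + 1) by
        funext j; simp [Function.comp]; ring]
      rw [slices_eq c0 cl (m0 :: ms') (by simp) (by
        intro m hmem
        have := hP.2.2 m hmem
        intro hnil
        rw [hnil] at this
        simp at this)]
  · have hA : ¬ _ = true := fun h => hP ((validA_iff c0 cl ms).1 h)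
    rw [Bool.not_eq_true] at hA
    have hB : ¬ _ = false := fun h => hP ((validB_iff c0 cl ms).1 h)
    rw [Bool.not_eq_false] at hB
    rw [hA, hB, if_pos rfl, if_pos rfl]

-- ===== VERDICT (by name: the statement is the Claim_ definition above) =====
theorem restore_email_list_spec : Claim_equal_restore_email_list := by
  intro s _
  show restore_email_list s = restore_email_list_alt s
  by_cases hm : '@' ∈ s.toList
  · rcases hc : sp s.toList with _ | ⟨c0, t⟩
    · exact absurd hc (sp_ne_nil _)
    · have hlen := sp_len_two s.toList hm
      rw [hc] at hlen
      have ht : t ≠ [] := by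
        intro h
        subst h
        simp at hlen
      rcases List.eq_nil_or_concat t with h | ⟨ms, cl, rfl⟩
      · exact absurd h ht
      · exact main_eq s hm c0 cl ms (by simpa using hc)
  · have hin := isIn_at_false s.toList hm
    have hpos : posF s.toList 0 = [] := posF_of_free _ hm 0
    unfold restore_email_list restore_email_list_alt
    simp [hin, hpos]
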